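-- pv_equiv track=rewrite | github.com/teraflop-ai/daft2dataset | src/frigg/common_crawl/extractors/video.py | valid_video_link
-- ===== SOURCE A (Python) =====
-- def valid_video_link(link):
--     valid_video = any(
--         link.get("url", "").endswith(ext)
--         for ext in [
--             ".avi",
--             ".mp4",
--             ".mkv",
--             ".webm",
--             ".mov",
--             ".mpg",
--             ".mpeg",
--             ".m4v",
--         ]
--     )
--     return valid_video
-- ===== SOURCE B (Python) =====
-- _VIDEO_EXTS = {"avi", "mp4", "mkv", "webm", "mov", "mpg", "mpeg", "m4v"}
--
-- def valid_video_link(link):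
--     url = link.get("url", "")
--     ext = []
--     for ch in reversed(url):
--         if ch == ".":
--             return "".join(reversed(ext)) in _VIDEO_EXTS
--         ext.append(ch)
--     return False
-- ===== Notes on version B (the rewrite author's own statement) =====
-- stated objective: alternative
-- what changed: B replaces the eight-suffix any(...endswith...) scan by a single reverse scan of the URL that extracts the extension after the last dot and tests it once against a set of bare extensions.
import Mathlib
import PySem

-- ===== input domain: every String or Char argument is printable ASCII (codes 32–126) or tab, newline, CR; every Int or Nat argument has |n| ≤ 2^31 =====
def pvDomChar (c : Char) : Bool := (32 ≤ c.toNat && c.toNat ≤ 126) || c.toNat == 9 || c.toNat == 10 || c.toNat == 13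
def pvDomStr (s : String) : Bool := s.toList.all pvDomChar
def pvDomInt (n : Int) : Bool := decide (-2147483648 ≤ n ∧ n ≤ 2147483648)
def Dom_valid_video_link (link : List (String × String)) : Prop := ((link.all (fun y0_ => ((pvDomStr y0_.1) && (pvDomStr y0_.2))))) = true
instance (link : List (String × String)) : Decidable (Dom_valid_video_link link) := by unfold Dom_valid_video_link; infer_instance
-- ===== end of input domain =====

-- B replaces the eight endswith tests by one reverse scan that extracts the extension after
-- the last dot and tests it against the extension set once (objective: alternative).

-- ===== PORT A =====
def valid_video_link (link : List (String × String)) : Bool :=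
  [".avi", ".mp4", ".mkv", ".webm", ".mov", ".mpg", ".mpeg", ".m4v"].any
    (fun ext => PySem.Str.endswith ((PySem.Dict.mk link).getD "url" "") ext)

-- ===== PORT B =====
def pvExts : List String := ["avi", "mp4", "mkv", "webm", "mov", "mpg", "mpeg", "m4v"]

def pvAltGo : List Char → List Char → Bool
  | [], _ => false
  | c :: rest, ext =>
    if c = '.' then pvExts.contains (String.ofList ext.reverse)
    else pvAltGo rest (ext ++ [c])

def valid_video_link_alt (link : List (String × String)) : Bool :=
  pvAltGo ((PySem.Dict.mk link).getD "url" "").toList.reverse []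

-- ===== PRECONDITION & SPEC =====
def Spec_valid_video_link (link : List (String × String)) (out : Bool) : Prop := out = valid_video_link_alt link
instance (link : List (String × String)) (out : Bool) : Decidable (Spec_valid_video_link link out) := by unfold Spec_valid_video_link; infer_instance

-- ===== CLAIM (what is proved, stated in full; the proofs are below) =====
def Claim_equal_valid_video_link : Prop := ∀ (link : List (String × String)), Dom_valid_video_link link → Spec_valid_video_link link (valid_video_link link)

-- ===== LEMMAS AND PROOFS =====
lemma pvAltGo_spec (rs acc : List Char) :
    pvAltGo rs acc =
      if '.' ∈ rs then pvExts.contains (String.ofList (acc ++ rs.takeWhile (· ≠ '.')).reverse)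
      else false := by
  induction rs generalizing acc with
  | nil => simp [pvAltGo]
  | cons c rest ih =>
    by_cases hc : c = '.'
    · subst hc; simp [pvAltGo]
    · simp [pvAltGo, hc, ih, List.mem_cons, Ne.symm hc, List.append_assoc]

lemma prefix_dot_iff (t rs : List Char) (ht : '.' ∉ t) :
    (t ++ ['.']) <+: rs ↔ ('.' ∈ rs ∧ rs.takeWhile (· ≠ '.') = t) := by
  constructor
  · rintro ⟨u, rfl⟩
    refine ⟨by simp, ?_⟩
    rw [List.append_assoc, List.takeWhile_append_of_pos ?_]
    · simp
    · intro c hcmem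
      simp only [ne_eq, decide_eq_true_eq]
      rintro rfl; exact ht hcmem
  · rintro ⟨hmem, ht'⟩
    have hd : rs.dropWhile (· ≠ '.') ≠ [] := by
      intro h
      rw [List.dropWhile_eq_nil_iff] at h
      have := h '.' hmem
      simp at this
    have hhead : ((rs.dropWhile (· ≠ '.')).head hd) = '.' := by
      have := List.head_dropWhile_not (fun c => decide (c ≠ '.')) hd
      simpa using this
    refine ⟨(rs.dropWhile (· ≠ '.')).tail, ?_⟩
    conv_rhs => rw [← List.takeWhile_append_dropWhile (p := (· ≠ '.')) (l := rs)]
    rw [ht', List.append_assoc]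
    congr 1
    conv_rhs => rw [← List.cons_head_tail hd]
    rw [hhead]
    rfl

lemma ends_iff (t cs : List Char) (ht : '.' ∉ t) :
    ('.' :: t <:+ cs) ↔ ('.' ∈ cs ∧ cs.reverse.takeWhile (· ≠ '.') = t.reverse) := by
  rw [← List.reverse_prefix]
  simp only [List.reverse_cons]
  rw [prefix_dot_iff _ _ (by simpa using ht)]
  simp

lemma main_core (cs : List Char) :
    ([".avi", ".mp4", ".mkv", ".webm", ".mov", ".mpg", ".mpeg", ".m4v"].any
      (fun ext => PySem.Chars.endswith cs ext.toList)) = pvAltGo cs.reverse [] := by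
  rw [pvAltGo_spec]
  simp only [List.mem_reverse, List.nil_append]
  rw [Bool.eq_iff_iff]
  by_cases hmem : '.' ∈ cs
  · simp only [hmem, if_true, List.any_eq_true, List.mem_cons,
      List.contains_eq_mem, String.ext_iff, pvExts, decide_eq_true_eq, List.mem_nil_iff]
    have key : ∀ t : List Char, '.' ∉ t →
        (('.' :: t <:+ cs) ↔ cs.reverse.takeWhile (· ≠ '.') = t.reverse) := by
      intro t ht
      rw [ends_iff t cs ht]
      simp [hmem]
    simp only [String.toList_ofList]
    constructor
    · rintro ⟨x, hx, hend⟩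
      rw [PySem.Chars.endswith_iff] at hend
      rcases hx with h|h|h|h|h|h|h|h|h
      · exact Or.inl (by rw [(key ['a','v','i'] (by decide)).1 (by rw [h] at hend; exact hend)]; decide)
      · exact Or.inr (Or.inl (by rw [(key ['m','p','4'] (by decide)).1 (by rw [h] at hend; exact hend)]; decide))
      · exact Or.inr (Or.inr (Or.inl (by rw [(key ['m','k','v'] (by decide)).1 (by rw [h] at hend; exact hend)]; decide)))
      · exact Or.inr (Or.inr (Or.inr (Or.inl (by rw [(key ['w','e','b','m'] (by decide)).1 (by rw [h] at hend; exact hend)]; decide))))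
      · exact Or.inr (Or.inr (Or.inr (Or.inr (Or.inl (by rw [(key ['m','o','v'] (by decide)).1 (by rw [h] at hend; exact hend)]; decide)))))
      · exact Or.inr (Or.inr (Or.inr (Or.inr (Or.inr (Or.inl (by rw [(key ['m','p','g'] (by decide)).1 (by rw [h] at hend; exact hend)]; decide))))))
      · exact Or.inr (Or.inr (Or.inr (Or.inr (Or.inr (Or.inr (Or.inl (by rw [(key ['m','p','e','g'] (by decide)).1 (by rw [h] at hend; exact hend)]; decide)))))))
      · exact Or.inr (Or.inr (Or.inr (Or.inr (Or.inr (Or.inr (Or.inr (Or.inl (by rw [(key ['m','4','v'] (by decide)).1 (by rw [h] at hend; exact hend)]; decide))))))))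
      · exact h.elim
    · intro h
      rcases h with h|h|h|h|h|h|h|h|h
      · refine ⟨".avi", Or.inl rfl, ?_⟩
        rw [PySem.Chars.endswith_iff]
        exact (key ['a','v','i'] (by decide)).2 (List.reverse_eq_iff.mp h)
      · refine ⟨".mp4", Or.inr (Or.inl rfl), ?_⟩
        rw [PySem.Chars.endswith_iff]
        exact (key ['m','p','4'] (by decide)).2 (List.reverse_eq_iff.mp h)
      · refine ⟨".mkv", Or.inr (Or.inr (Or.inl rfl)), ?_⟩
        rw [PySem.Chars.endswith_iff]
        exact (key ['m','k','v'] (by decide)).2 (List.reverse_eq_iff.mp h)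
      · refine ⟨".webm", Or.inr (Or.inr (Or.inr (Or.inl rfl))), ?_⟩
        rw [PySem.Chars.endswith_iff]
        exact (key ['w','e','b','m'] (by decide)).2 (List.reverse_eq_iff.mp h)
      · refine ⟨".mov", Or.inr (Or.inr (Or.inr (Or.inr (Or.inl rfl)))), ?_⟩
        rw [PySem.Chars.endswith_iff]
        exact (key ['m','o','v'] (by decide)).2 (List.reverse_eq_iff.mp h)
      · refine ⟨".mpg", Or.inr (Or.inr (Or.inr (Or.inr (Or.inr (Or.inl rfl))))), ?_⟩
        rw [PySem.Chars.endswith_iff]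
        exact (key ['m','p','g'] (by decide)).2 (List.reverse_eq_iff.mp h)
      · refine ⟨".mpeg", Or.inr (Or.inr (Or.inr (Or.inr (Or.inr (Or.inr (Or.inl rfl)))))), ?_⟩
        rw [PySem.Chars.endswith_iff]
        exact (key ['m','p','e','g'] (by decide)).2 (List.reverse_eq_iff.mp h)
      · refine ⟨".m4v", Or.inr (Or.inr (Or.inr (Or.inr (Or.inr (Or.inr (Or.inr (Or.inl rfl))))))), ?_⟩
        rw [PySem.Chars.endswith_iff]
        exact (key ['m','4','v'] (by decide)).2 (List.reverse_eq_iff.mp h)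
      · exact h.elim
  · simp only [hmem, if_false]
    simp only [List.any_eq_true, List.mem_cons]
    constructor
    · rintro ⟨x, hx, hend⟩
      rw [PySem.Chars.endswith_iff] at hend
      exfalso
      rcases hx with rfl|rfl|rfl|rfl|rfl|rfl|rfl|rfl|h
      all_goals first
        | (exact hmem (hend.mem (by decide)))
        | simp at h
    · simp

-- ===== VERDICT (by name: the statement is the Claim_ definition above) =====
theorem valid_video_link_spec : Claim_equal_valid_video_link := by
  intro link _
  show valid_video_link link = valid_video_link_alt link
  simp only [valid_video_link, valid_video_link_alt, PySem.Str.endswith_eq]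
  exact main_core _
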